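-- pv_equiv track=rewrite | github.com/mooritexxx/shopifyseo | shopifyseo/dashboard_ai_engine_parts/providers.py | _extract_rate_limit_headers
-- ===== SOURCE A (Python) =====
-- def _extract_rate_limit_headers(headers: dict[str, object]) -> dict[str, object]:
--     wanted = (
--         "x-ratelimit-limit-requests",
--         "x-ratelimit-remaining-requests",
--         "x-ratelimit-reset-requests",
--         "x-ratelimit-limit-tokens",
--         "x-ratelimit-remaining-tokens",
--         "x-ratelimit-reset-tokens",
--         "retry-after",
--         "openai-organization",
--         "openai-project",
--         "x-request-id",
--     )
--     normalized = {str(key).lower(): value for key, value in headers.items()}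
--     return {key: normalized[key] for key in wanted if key in normalized}
-- ===== SOURCE B (Python) =====
-- def _extract_rate_limit_headers(headers: dict[str, object]) -> dict[str, object]:
--     wanted = (
--         "x-ratelimit-limit-requests",
--         "x-ratelimit-remaining-requests",
--         "x-ratelimit-reset-requests",
--         "x-ratelimit-limit-tokens",
--         "x-ratelimit-remaining-tokens",
--         "x-ratelimit-reset-tokens",
--         "retry-after",
--         "openai-organization",
--         "openai-project",
--         "x-request-id",
--     )
--     result = {}
--     for wanted_key in wanted:
--         found = False
--         value = None
--         for key, val in headers.items():
--             if str(key).lower() == wanted_key: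
--                 found = True
--                 value = val
--         if found:
--             result[wanted_key] = value
--     return result
-- ===== Notes on version B (the rewrite author's own statement) =====
-- stated objective: alternative
-- what changed: Replaces A's build-a-normalized-dict-then-filter with an index-free nested scan: for each wanted key, scan headers.items() once keeping the last case-insensitive match (found flag + value), so no intermediate dict is built.
import Mathlib
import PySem

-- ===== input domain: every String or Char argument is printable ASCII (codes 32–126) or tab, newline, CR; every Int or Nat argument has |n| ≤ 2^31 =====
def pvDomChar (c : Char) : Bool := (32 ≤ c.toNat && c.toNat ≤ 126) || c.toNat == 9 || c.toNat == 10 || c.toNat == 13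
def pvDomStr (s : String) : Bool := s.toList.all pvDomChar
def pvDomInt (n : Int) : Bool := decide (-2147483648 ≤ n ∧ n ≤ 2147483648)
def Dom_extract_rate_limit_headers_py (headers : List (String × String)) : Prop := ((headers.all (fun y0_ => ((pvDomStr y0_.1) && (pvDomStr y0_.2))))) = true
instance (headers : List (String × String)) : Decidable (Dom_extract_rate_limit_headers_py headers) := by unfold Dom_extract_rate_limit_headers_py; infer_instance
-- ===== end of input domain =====

-- B replaces A's normalized-dict index with a per-wanted-key last-match scan of the headers
-- (alternative decomposition, not claimed faster). Return-value equivalence only; neither mutates.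

def pvWanted : List String :=
  [ "x-ratelimit-limit-requests",
    "x-ratelimit-remaining-requests",
    "x-ratelimit-reset-requests",
    "x-ratelimit-limit-tokens",
    "x-ratelimit-remaining-tokens",
    "x-ratelimit-reset-tokens",
    "retry-after",
    "openai-organization",
    "openai-project",
    "x-request-id" ]

-- ===== PORT A =====
-- normalized = {str(key).lower(): value for key, value in headers.items()}
-- return {key: normalized[key] for key in wanted if key in normalized}
def extract_rate_limit_headers_py (headers : List (String × String)) : List (String × String) :=
  let normalized : PySem.Dict String String :=
    headers.foldl (fun d p => d.insert (PySem.Str.lower p.1) p.2) PySem.Dict.empty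
  pvWanted.foldl (fun acc key =>
    match normalized.get? key with
    | some v => acc ++ [(key, v)]
    | none => acc) []

-- ===== PORT B =====
-- inner scan of Source B: found flag + value ≈ Option; last match wins
def pvScanLast (headers : List (String × String)) (wantedKey : String) : Option String :=
  headers.foldl (fun acc p => if PySem.Str.lower p.1 == wantedKey then some p.2 else acc) none

def extract_rate_limit_headers_py_alt (headers : List (String × String)) : List (String × String) :=
  pvWanted.foldl (fun result wantedKey =>
    match pvScanLast headers wantedKey with
    | some value => result ++ [(wantedKey, value)]
    | none => result) []

-- ===== PRECONDITION & SPEC =====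
def Spec_extract_rate_limit_headers_py (headers : List (String × String)) (out : List (String × String)) : Prop := out = extract_rate_limit_headers_py_alt headers
instance (headers : List (String × String)) (out : List (String × String)) : Decidable (Spec_extract_rate_limit_headers_py headers out) := by unfold Spec_extract_rate_limit_headers_py; infer_instance

-- ===== CLAIM (what is proved, stated in full; the proofs are below) =====
def Claim_equal_extract_rate_limit_headers_py : Prop := ∀ (headers : List (String × String)), Dom_extract_rate_limit_headers_py headers → Spec_extract_rate_limit_headers_py headers (extract_rate_limit_headers_py headers)

-- ===== LEMMAS AND PROOFS =====

-- A's normalized-dict lookup equals B's last-match scan (generalized over the starting dict/accumulator)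
theorem pv_get?_foldl_eq_scan (l : List (String × String)) (d : PySem.Dict String String) (w : String) :
    (l.foldl (fun d p => d.insert (PySem.Str.lower p.1) p.2) d).get? w
      = l.foldl (fun acc p => if PySem.Str.lower p.1 == w then some p.2 else acc) (d.get? w) := by
  induction l generalizing d with
  | nil => rfl
  | cons p rest ih =>
    simp only [List.foldl_cons, ih]
    congr 1
    rw [PySem.Dict.get?_insert]
    by_cases h : PySem.Str.lower p.1 = w
    · simp [h]
    · simp [h, Ne.symm h]

theorem pv_get?_eq_scan (headers : List (String × String)) (w : String) :
    (headers.foldl (fun d p => d.insert (PySem.Str.lower p.1) p.2) PySem.Dict.empty).get? w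
      = pvScanLast headers w := by
  rw [pv_get?_foldl_eq_scan, PySem.Dict.get?_empty]; rfl

-- ===== VERDICT (by name: the statement is the Claim_ definition above) =====
theorem extract_rate_limit_headers_py_spec : Claim_equal_extract_rate_limit_headers_py := by
  intro headers _
  unfold Spec_extract_rate_limit_headers_py extract_rate_limit_headers_py extract_rate_limit_headers_py_alt
  simp only [pv_get?_eq_scan]
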